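-- pv_equiv track=rewrite | github.com/mikoar/coma | src/processing/vectorise.py | vectorise
-- ===== SOURCE A (Python) =====
-- from typing import Iterable, List
--
-- def vectorise(positions: Iterable[int], resolution=100):
--     window_start = 0
--     window_end = window_start + resolution
--     for position in positions:
--         if position < window_start:
--             continue
--         while position >= window_end:
--             window_start += resolution
--             window_end += resolution
--             yield 0
--
--         yield 1
--         window_start += resolution
--         window_end += resolution
-- ===== SOURCE B (Python) =====
-- def vectorise(positions, resolution=100):
--     # Pass 1: collect the occupied window indices (a running-max filter of p // resolution).
--     kept = []
--     last = -1
--     for p in positions: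
--         w = p // resolution
--         if w > last:
--             kept.append(w)
--             last = w
--     # Pass 2: allocate a zero vector covering windows 0..last and mark the occupied ones.
--     vec = [0] * (last + 1)
--     for w in kept:
--         vec[w] = 1
--     yield from vec
-- ===== Notes on version B (the rewrite author's own statement) =====
-- stated objective: alternative
-- what changed: B replaces A's streaming scan (interleaving yielded zeros with window tracking) by two staged passes: first a running-max filter collecting the occupied window indices p//resolution, then allocating a zero vector of length last+1 and setting ones at those indices.
-- outside the precondition, e.g. on vectorise([-5], -3): A returns [], B returns [0, 1]
import Mathlib
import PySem

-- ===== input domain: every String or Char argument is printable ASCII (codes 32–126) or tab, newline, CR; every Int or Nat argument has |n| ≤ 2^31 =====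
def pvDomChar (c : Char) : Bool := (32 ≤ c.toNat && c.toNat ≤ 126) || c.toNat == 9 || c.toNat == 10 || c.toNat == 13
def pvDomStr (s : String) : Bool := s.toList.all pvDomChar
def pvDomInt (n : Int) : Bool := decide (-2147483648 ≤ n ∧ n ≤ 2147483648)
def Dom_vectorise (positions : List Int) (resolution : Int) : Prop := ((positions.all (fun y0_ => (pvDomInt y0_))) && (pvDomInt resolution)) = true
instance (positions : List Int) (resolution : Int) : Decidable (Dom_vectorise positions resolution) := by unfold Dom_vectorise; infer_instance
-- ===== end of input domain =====

-- B replaces A's streaming scan by two staged passes: collect occupied window indices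
-- (running-max filter of p // resolution), then fill a preallocated zero vector;
-- objective: alternative. Equivalence proved for positive resolution.

-- ===== PORT A =====
-- inner 'while position >= window_end: advance both windows, yield 0'; the '0 < res'
-- conjunct only makes the recursion total where the Python while would not terminate
def vecWhileA (position ws we res : Int) (acc : List Int) : Int × Int × List Int :=
  if h : we ≤ position ∧ 0 < res then
    vecWhileA position (ws + res) (we + res) res (acc ++ [0])
  else (ws, we, acc)
termination_by (position + 1 - we).toNat
decreasing_by omega

def vecLoopA (positions : List Int) (ws we res : Int) (acc : List Int) : List Int :=
  match positions with
  | [] => acc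
  | p :: rest =>
    if p < ws then vecLoopA rest ws we res acc
    else
      let s := vecWhileA p ws we res acc
      vecLoopA rest (s.1 + res) (s.2.1 + res) res (s.2.2 ++ [1])

def vectorise (positions : List Int) (resolution : Int) : List Int :=
  vecLoopA positions 0 (0 + resolution) resolution []

-- ===== PORT B =====
-- pass 1 of Source B: the loop over positions carrying (kept, last)
def bScan (positions : List Int) (kept : List Int) (last res : Int) : List Int × Int :=
  match positions with
  | [] => (kept, last)
  | p :: rest =>
    let w := PySem.Int.floordiv p res
    if last < w then bScan rest (kept ++ [w]) w res else bScan rest kept last res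

-- pass 2 of Source B: 'vec[w] = 1'; List.set w.toNat is exact here because every kept
-- index satisfies 0 ≤ w < len(vec) (no negative-index wraparound is reachable)
def vectorise_alt (positions : List Int) (resolution : Int) : List Int :=
  let s := bScan positions [] (-1) resolution
  let vec := List.replicate (s.2 + 1).toNat (0 : Int)
  s.1.foldl (fun v w => v.set w.toNat 1) vec

-- ===== PRECONDITION & SPEC =====
-- Pre_ excludes non-positive resolution: there A diverges as soon as a position ≥ 0
-- occurs (and the windowing is meaningless); the degenerate inputs where A still
-- returns an empty result because every position is negative are excluded with it.
def Pre_vectorise (positions : List Int) (resolution : Int) : Prop := 0 < resolution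
instance (positions : List Int) (resolution : Int) : Decidable (Pre_vectorise positions resolution) := by unfold Pre_vectorise; infer_instance
def pvWitness_vectorise : List Int × Int := ([0, 205, 150], 100)
def Spec_vectorise (positions : List Int) (resolution : Int) (out : List Int) : Prop := out = vectorise_alt positions resolution
instance (positions : List Int) (resolution : Int) (out : List Int) : Decidable (Spec_vectorise positions resolution out) := by unfold Spec_vectorise; infer_instance

-- ===== CLAIM (what is proved, stated in full; the proofs are below) =====
def Claim_equal_vectorise : Prop := ∀ (positions : List Int) (resolution : Int), Dom_vectorise positions resolution → Pre_vectorise positions resolution → Spec_vectorise positions resolution (vectorise positions resolution)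

-- ===== LEMMAS AND PROOFS =====

-- proof-only intermediate: A's output streamed with a division-based counter
def vecStream (positions : List Int) (c res : Int) : List Int :=
  match positions with
  | [] => []
  | p :: rest =>
    let w := PySem.Int.floordiv p res
    if w < c then vecStream rest c res
    else List.replicate (w - c).toNat 0 ++ 1 :: vecStream rest (w + 1) res

-- proof-only: kept window indices collected from counter state 'last'
def keptB (positions : List Int) (last res : Int) : List Int :=
  match positions with
  | [] => []
  | p :: rest =>
    let w := PySem.Int.floordiv p res
    if last < w then w :: keptB rest w res else keptB rest last res

-- proof-only: render a kept-index list as the occupancy stream starting at window c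
def renderB (c : Int) (ws : List Int) : List Int :=
  match ws with
  | [] => []
  | w :: rest => List.replicate (w - c).toNat 0 ++ 1 :: renderB (w + 1) rest

-- A's inner while, started at window c, stops at window c + n and emits n zeros
lemma vecWhileA_go (res p : Int) (hres : 0 < res) :
    ∀ (n : Nat) (c : Int) (acc : List Int),
      PySem.Int.floordiv p res = c + n →
      vecWhileA p (c * res) (c * res + res) res acc =
        ((c + n) * res, (c + n) * res + res, acc ++ List.replicate n 0) := by
  intro n
  induction n with
  | zero =>
    intro c acc h
    have hb := (PySem.Int.floordiv_eq_iff_of_pos hres).mp (by omega : PySem.Int.floordiv p res = c)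
    have hlt : p < c * res + res := by nlinarith [hb.2]
    rw [vecWhileA, dif_neg (by omega)]
    simp
  | succ k ih =>
    intro c acc h
    have hb := (PySem.Int.floordiv_eq_iff_of_pos hres).mp h
    have hb1 := hb.1
    have hkr : 0 ≤ (k : Int) * res := mul_nonneg (by positivity) hres.le
    have hle : c * res + res ≤ p := by push_cast at hb1; nlinarith [hb1, hkr]
    rw [vecWhileA, dif_pos ⟨hle, hres⟩]
    have e1 : c * res + res = (c + 1) * res := by ring
    rw [e1, ih (c + 1) (acc ++ [0]) (by omega)]
    have e2 : c + 1 + (k : Int) = c + (k + 1 : Nat) := by push_cast; ring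
    rw [e2]
    simp [List.replicate_succ]

-- A's loop equals the division-based stream
lemma vecLoopA_eq (res : Int) (hres : 0 < res) :
    ∀ (positions : List Int) (c : Int) (acc : List Int),
      vecLoopA positions (c * res) (c * res + res) res acc =
        acc ++ vecStream positions c res := by
  intro positions
  induction positions with
  | nil => intro c acc; simp [vecLoopA, vecStream]
  | cons p rest ih =>
    intro c acc
    rw [vecLoopA, vecStream]
    by_cases hskip : p < c * res
    · have hwc : PySem.Int.floordiv p res < c := by
        rw [PySem.Int.floordiv_lt_iff_lt_mul hres]; exact hskip
      rw [if_pos hskip, if_pos hwc, ih]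
    · have hwc : ¬ PySem.Int.floordiv p res < c := by
        rw [PySem.Int.floordiv_lt_iff_lt_mul hres]; omega
      rw [if_neg hskip, if_neg hwc]
      have hcw : c ≤ PySem.Int.floordiv p res := by omega
      have hfd : PySem.Int.floordiv p res = c + ((PySem.Int.floordiv p res - c).toNat : Int) := by
        omega
      have hstep := vecWhileA_go res p hres (PySem.Int.floordiv p res - c).toNat c acc hfd
      simp only [hstep]
      have e1 : (c + ((PySem.Int.floordiv p res - c).toNat : Int)) * res + res
          = (PySem.Int.floordiv p res + 1) * res := by rw [← hfd]; ring
      rw [e1, ih (PySem.Int.floordiv p res + 1)]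
      simp

-- the stream is the rendering of the kept indices
lemma vecStream_eq_render (res : Int) :
    ∀ (positions : List Int) (c : Int),
      vecStream positions c res = renderB c (keptB positions (c - 1) res) := by
  intro positions
  induction positions with
  | nil => intro c; simp [vecStream, keptB, renderB]
  | cons p rest ih =>
    intro c
    rw [vecStream, keptB]
    by_cases h : PySem.Int.floordiv p res < c
    · rw [if_pos h, if_neg (by omega), ih]
    · rw [if_neg h, if_pos (by omega), renderB]
      have := ih (PySem.Int.floordiv p res + 1)
      rw [this]
      norm_num

-- getLastD over a cons, and membership of getLastD
lemma gLD_cons (a d : Int) (l : List Int) : (a :: l).getLastD d = l.getLastD a := by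
  cases l <;> simp [List.getLastD]

lemma gLD_mem (d : Int) (l : List Int) : l.getLastD d = d ∨ l.getLastD d ∈ l := by
  induction l generalizing d with
  | nil => left; rfl
  | cons a t ih =>
    right
    rw [gLD_cons]
    rcases ih a with h | h
    · rw [h]; exact List.mem_cons_self
    · exact List.mem_cons_of_mem _ h

-- every kept index exceeds the running 'last', and the kept list is strictly increasing
lemma keptB_gt_pairwise (res : Int) :
    ∀ (positions : List Int) (last : Int),
      (∀ w ∈ keptB positions last res, last < w) ∧
        (keptB positions last res).Pairwise (· < ·) := by
  intro positions
  induction positions with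
  | nil => intro last; simp [keptB]
  | cons p rest ih =>
    intro last
    rw [keptB]
    by_cases h : last < PySem.Int.floordiv p res
    · rw [if_pos h]
      obtain ⟨hgt, hpw⟩ := ih (PySem.Int.floordiv p res)
      refine ⟨?_, ?_⟩
      · intro w hw
        rcases List.mem_cons.mp hw with rfl | hw
        · exact h
        · exact lt_trans h (hgt w hw)
      · exact List.pairwise_cons.mpr ⟨hgt, hpw⟩
    · rw [if_neg h]; exact ih last

-- bScan accumulates keptB and tracks its last element
lemma bScan_eq (res : Int) :
    ∀ (positions : List Int) (kept : List Int) (last : Int),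
      bScan positions kept last res =
        (kept ++ keptB positions last res, (keptB positions last res).getLastD last) := by
  intro positions
  induction positions with
  | nil => intro kept last; simp [bScan, keptB]
  | cons p rest ih =>
    intro kept last
    rw [bScan, keptB]
    by_cases h : last < PySem.Int.floordiv p res
    · rw [if_pos h, if_pos h, ih, gLD_cons]
      simp
    · rw [if_neg h, if_neg h, ih]

-- setting index z.length in z ++ 0 :: t flips exactly that zero
lemma set_mid (z t : List Int) : (z ++ 0 :: t).set z.length 1 = z ++ 1 :: t := by
  induction z with
  | nil => simp
  | cons a z ih => simp [ih]

-- filling ones at a strictly increasing index list into the zero vector renders it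
lemma fold_set_eq :
    ∀ (ws : List Int) (z : List Int),
      ws.Pairwise (· < ·) → (∀ w ∈ ws, (z.length : Int) ≤ w) →
      ws.foldl (fun v w => v.set w.toNat 1)
          (z ++ List.replicate (ws.getLastD ((z.length : Int) - 1) + 1 - z.length).toNat 0)
        = z ++ renderB z.length ws := by
  intro ws
  induction ws with
  | nil => intro z _ _; simp [renderB]
  | cons w rest ih =>
    intro z hpw hlb
    have hwz : (z.length : Int) ≤ w := hlb w List.mem_cons_self
    obtain ⟨hrest_gt, hpw'⟩ := List.pairwise_cons.mp hpw
    have hwlast : w ≤ rest.getLastD w := by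
      rcases gLD_mem w rest with h | h
      · omega
      · exact le_of_lt (hrest_gt _ h)
    -- split the zero block at index w
    have hz : z ++ List.replicate ((w :: rest).getLastD ((z.length : Int) - 1) + 1 - z.length).toNat 0
        = (z ++ List.replicate (w - z.length).toNat (0 : Int)) ++ (0 : Int) ::
            List.replicate (rest.getLastD w - w).toNat 0 := by
      rw [gLD_cons]
      have hsum : ((rest.getLastD w) + 1 - z.length).toNat
          = (w - z.length).toNat + (1 + ((rest.getLastD w) - w).toNat) := by omega
      rw [hsum, List.replicate_add, List.replicate_add]
      simp [List.replicate_succ]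
    rw [List.foldl_cons, hz]
    have hlen : ((z ++ List.replicate (w - z.length).toNat (0 : Int))).length = w.toNat := by
      simp; omega
    have hset : ((z ++ List.replicate (w - z.length).toNat (0 : Int)) ++ (0 : Int) ::
            List.replicate (rest.getLastD w - w).toNat 0).set w.toNat 1
        = (z ++ List.replicate (w - z.length).toNat (0 : Int) ++ [1]) ++
            List.replicate (rest.getLastD w - w).toNat 0 := by
      rw [← hlen, set_mid]
      simp
    rw [hset]
    have hz'len : ((z ++ List.replicate (w - z.length).toNat (0 : Int) ++ [1]).length : Int)
        = w + 1 := by simp; omega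
    have hlb' : ∀ y ∈ rest,
        ((z ++ List.replicate (w - z.length).toNat (0 : Int) ++ [1]).length : Int) ≤ y := by
      intro y hy; rw [hz'len]; exact (hrest_gt y hy)
    have hrep : List.replicate (rest.getLastD w - w).toNat (0 : Int)
        = List.replicate
            (rest.getLastD (((z ++ List.replicate (w - z.length).toNat (0 : Int) ++ [1]).length : Int) - 1) + 1
              - (z ++ List.replicate (w - z.length).toNat (0 : Int) ++ [1]).length).toNat 0 := by
      have e : (((z ++ List.replicate (w - z.length).toNat (0 : Int) ++ [1]).length : Int) - 1) = w := by
        rw [hz'len]; ring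
      rw [e]
      congr 1
      have hzl : ((z ++ List.replicate (w - z.length).toNat (0 : Int) ++ [1]).length : Int) = w + 1 :=
        hz'len
      omega
    rw [hrep, ih _ hpw' hlb']
    rw [renderB]
    have hz'' : (z ++ List.replicate (w - z.length).toNat (0 : Int) ++ [1]).length = w.toNat + 1 := by
      simp; omega
    rw [hz'']
    have hren : renderB (((w.toNat + 1 : Nat) : Int)) rest = renderB (w + 1) rest := by
      congr 1; omega
    rw [hren]
    simp [List.append_assoc]

-- ===== VERDICT (by name: the statement is the Claim_ definition above) =====
theorem vectorise_spec : Claim_equal_vectorise := by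
  intro positions resolution _ hpre
  unfold Spec_vectorise vectorise vectorise_alt
  have hA : vecLoopA positions 0 (0 + resolution) resolution [] =
      vecStream positions 0 resolution := by
    simpa using vecLoopA_eq resolution hpre positions 0 []
  have hS : vecStream positions 0 resolution =
      renderB 0 (keptB positions (-1) resolution) := by
    simpa using vecStream_eq_render resolution positions 0
  have hscan := bScan_eq resolution positions [] (-1)
  obtain ⟨hgt, hpw⟩ := keptB_gt_pairwise resolution positions (-1)
  have hfold : List.foldl (fun v w => v.set w.toNat 1)
      (List.replicate ((keptB positions (-1) resolution).getLastD (-1) + 1).toNat 0)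
      (keptB positions (-1) resolution) = renderB 0 (keptB positions (-1) resolution) := by
    simpa using fold_set_eq (keptB positions (-1) resolution) [] hpw
      (by intro w hw; have := hgt w hw; simp; omega)
  rw [hscan]
  simp only [List.nil_append]
  rw [hA, hS, ← hfold]
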